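-- pv_equiv track=rewrite | github.com/ajsmedina/PikaTweet | main.py | generate_pika
-- ===== SOURCE A (Python) =====
-- def generate_pika(syllables, start_pi, is_capital, is_capslock):
--     use_pi = start_pi or syllables > 1
--     word_to_return = ''
--
--     for i in range(syllables):
--         if use_pi:
--             if i == syllables - 1 and syllables > 1:
--                 word_to_return += 'CHU' if is_capslock else 'chu'
--             else:
--                 word_to_return += 'P' if is_capslock or (is_capital and i == 0) else 'p'
--                 word_to_return += 'I' if is_capslock else 'i'
--         else:
--             word_to_return += 'K' if is_capslock or (is_capital and i == 0) else 'k'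
--             word_to_return += 'A' if is_capslock else 'a'
--
--         use_pi = not use_pi
--
--     return word_to_return
-- ===== SOURCE B (Python) =====
-- def generate_pika(syllables, start_pi, is_capital, is_capslock):
--     # Build the lowercase base word first, then apply casing as whole-string operations.
--     use_pi = start_pi or syllables > 1
--     parts = []
--     for i in range(syllables):
--         if use_pi and i == syllables - 1 and syllables > 1:
--             parts.append('chu')
--         elif use_pi:
--             parts.append('pi')
--         else:
--             parts.append('ka')
--         use_pi = not use_pi
--     word = ''.join(parts)
--     if is_capslock:
--         return word.upper()
--     if is_capital:
--         return word[:1].upper() + word[1:]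
--     return word
-- ===== Notes on version B (the rewrite author's own statement) =====
-- stated objective: simpler
-- what changed: B builds the lowercase base word in one pass (collecting syllable chunks and joining) and applies casing afterwards as a single whole-string transform (upper / capitalize-first), instead of A's per-character inline casing decisions inside the loop.
import Mathlib
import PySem

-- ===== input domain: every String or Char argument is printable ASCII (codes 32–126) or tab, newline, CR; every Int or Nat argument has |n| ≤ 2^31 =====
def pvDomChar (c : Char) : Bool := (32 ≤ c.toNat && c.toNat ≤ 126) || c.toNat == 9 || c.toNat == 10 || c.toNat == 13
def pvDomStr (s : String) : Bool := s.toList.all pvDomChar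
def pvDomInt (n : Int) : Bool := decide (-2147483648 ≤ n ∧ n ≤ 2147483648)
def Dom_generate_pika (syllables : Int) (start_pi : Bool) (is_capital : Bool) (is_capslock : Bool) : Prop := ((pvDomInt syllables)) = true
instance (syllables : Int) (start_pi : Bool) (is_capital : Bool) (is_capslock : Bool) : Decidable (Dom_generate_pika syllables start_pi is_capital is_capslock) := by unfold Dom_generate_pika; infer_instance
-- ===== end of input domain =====

-- B builds the lowercase base word first and applies casing as one whole-string transform afterwards (simpler decomposition); A decides casing per character inside the loop.

-- ===== PORT A =====
def generate_pika (syllables : Int) (start_pi : Bool) (is_capital : Bool) (is_capslock : Bool) : String :=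
  String.ofList
    ((PySem.List.pyRange 0 syllables).foldl
      (fun (st : Bool × List Char) (i : Int) =>
        (!st.1,
          if st.1 then
            if i == syllables - 1 && decide (1 < syllables) then
              st.2 ++ (if is_capslock then "CHU".toList else "chu".toList)
            else
              (st.2 ++ (if is_capslock || (is_capital && i == 0) then "P".toList else "p".toList))
                ++ (if is_capslock then "I".toList else "i".toList)
          else
            (st.2 ++ (if is_capslock || (is_capital && i == 0) then "K".toList else "k".toList))
              ++ (if is_capslock then "A".toList else "a".toList)))
      (start_pi || decide (1 < syllables), [])).2

-- ===== PORT B =====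
def generate_pika_alt (syllables : Int) (start_pi : Bool) (is_capital : Bool) (is_capslock : Bool) : String :=
  let word : List Char :=
    PySem.Chars.join []
      ((PySem.List.pyRange 0 syllables).foldl
        (fun (st : Bool × List (List Char)) (i : Int) =>
          (!st.1,
            st.2 ++ [if st.1 && i == syllables - 1 && decide (1 < syllables) then "chu".toList
                     else if st.1 then "pi".toList
                     else "ka".toList]))
        (start_pi || decide (1 < syllables), [])).2
  if is_capslock then String.ofList (PySem.Chars.upper word)
  else if is_capital then
    String.ofList (PySem.Chars.upper (PySem.List.slice word none (some 1)) ++ PySem.List.slice word (some 1) none)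
  else String.ofList word

-- ===== PRECONDITION & SPEC =====
def Spec_generate_pika (syllables : Int) (start_pi : Bool) (is_capital : Bool) (is_capslock : Bool) (out : String) : Prop := out = generate_pika_alt syllables start_pi is_capital is_capslock
instance (syllables : Int) (start_pi : Bool) (is_capital : Bool) (is_capslock : Bool) (out : String) : Decidable (Spec_generate_pika syllables start_pi is_capital is_capslock out) := by unfold Spec_generate_pika; infer_instance

-- ===== CLAIM (what is proved, stated in full; the proofs are below) =====
def Claim_equal_generate_pika : Prop := ∀ (syllables : Int) (start_pi : Bool) (is_capital : Bool) (is_capslock : Bool), Dom_generate_pika syllables start_pi is_capital is_capslock → Spec_generate_pika syllables start_pi is_capital is_capslock (generate_pika syllables start_pi is_capital is_capslock)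

-- ===== LEMMAS AND PROOFS =====

-- A's per-iteration chunk (what A appends at index i when use_pi = u)
def chunkA (n : Int) (caps cap : Bool) (u : Bool) (i : Int) : List Char :=
  if u then
    if i == n - 1 && decide (1 < n) then (if caps then "CHU".toList else "chu".toList)
    else (if caps || (cap && i == 0) then "P".toList else "p".toList)
      ++ (if caps then "I".toList else "i".toList)
  else (if caps || (cap && i == 0) then "K".toList else "k".toList)
    ++ (if caps then "A".toList else "a".toList)

-- B's per-iteration chunk (always lowercase)
def chunkB (n : Int) (u : Bool) (i : Int) : List Char :=
  if u && i == n - 1 && decide (1 < n) then "chu".toList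
  else if u then "pi".toList
  else "ka".toList

def sufA (n : Int) (caps cap : Bool) : List Int → Bool → List Char
  | [], _ => []
  | i :: l, u => chunkA n caps cap u i ++ sufA n caps cap l (!u)

def partsB (n : Int) : List Int → Bool → List (List Char)
  | [], _ => []
  | i :: l, u => chunkB n u i :: partsB n l (!u)

lemma foldA_snd (n : Int) (caps cap : Bool) (l : List Int) : ∀ (u : Bool) (w : List Char),
    (l.foldl
      (fun (st : Bool × List Char) (i : Int) =>
        (!st.1,
          if st.1 then
            if i == n - 1 && decide (1 < n) then
              st.2 ++ (if caps then "CHU".toList else "chu".toList)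
            else
              (st.2 ++ (if caps || (cap && i == 0) then "P".toList else "p".toList))
                ++ (if caps then "I".toList else "i".toList)
          else
            (st.2 ++ (if caps || (cap && i == 0) then "K".toList else "k".toList))
              ++ (if caps then "A".toList else "a".toList)))
      (u, w)).2 = w ++ sufA n caps cap l u := by
  induction l with
  | nil => intro u w; simp [sufA]
  | cons i l ih =>
    intro u w
    simp only [List.foldl_cons]
    rw [ih]
    simp only [sufA, chunkA]
    split_ifs <;> simp

lemma foldB_snd (n : Int) (l : List Int) : ∀ (u : Bool) (ps : List (List Char)),
    (l.foldl
      (fun (st : Bool × List (List Char)) (i : Int) =>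
        (!st.1,
          st.2 ++ [if st.1 && i == n - 1 && decide (1 < n) then "chu".toList
                   else if st.1 then "pi".toList
                   else "ka".toList]))
      (u, ps)).2 = ps ++ partsB n l u := by
  induction l with
  | nil => intro u ps; simp [partsB]
  | cons i l ih =>
    intro u ps
    simp only [List.foldl_cons]
    rw [ih]
    simp [partsB, chunkB]

lemma join_nil_eq_flatten (ps : List (List Char)) : PySem.Chars.join [] ps = ps.flatten := by
  induction ps with
  | nil => rfl
  | cons p ps ih =>
    cases ps with
    | nil => simp [PySem.Chars.join, List.intercalate]
    | cons q ps' => rw [PySem.Chars.join_cons_cons] at *; simp_all [PySem.Chars.join]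

lemma gp_eq (n : Int) (sp cap caps : Bool) :
    generate_pika n sp cap caps
      = String.ofList (sufA n caps cap (PySem.List.pyRange 0 n) (sp || decide (1 < n))) := by
  unfold generate_pika
  rw [foldA_snd]
  simp

lemma gpalt_eq (n : Int) (sp cap caps : Bool) :
    generate_pika_alt n sp cap caps
      = (let word := (partsB n (PySem.List.pyRange 0 n) (sp || decide (1 < n))).flatten
         if caps then String.ofList (PySem.Chars.upper word)
         else if cap then
           String.ofList (PySem.Chars.upper (word.take 1) ++ word.drop 1)
         else String.ofList word) := by
  unfold generate_pika_alt
  rw [foldB_snd]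
  simp [join_nil_eq_flatten, PySem.List.slice_to, PySem.List.slice_from]

lemma caps_case (n : Int) (cap : Bool) (l : List Int) : ∀ u,
    sufA n true cap l u = PySem.Chars.upper ((partsB n l u).flatten) := by
  induction l with
  | nil => intro u; simp [sufA, partsB, PySem.Chars.upper]
  | cons i l ih =>
    intro u
    have h : chunkA n true cap u i = PySem.Chars.upper (chunkB n u i) := by
      cases u
      · simp only [chunkA, chunkB]; simp; try decide
      · by_cases hc : (i == n - 1 && decide (1 < n)) = true
        · simp only [chunkA, chunkB]; simp [hc]; try decide
        · simp only [chunkA, chunkB]; simp [hc]; try decide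
    simp only [sufA, partsB, List.flatten_cons]
    rw [ih, h]
    simp [PySem.Chars.upper]

lemma plain_chunk (n : Int) (u : Bool) (i : Int) : chunkA n false false u i = chunkB n u i := by
  cases u
  · simp only [chunkA, chunkB]; simp; try decide
  · by_cases hc : (i == n - 1 && decide (1 < n)) = true
    · simp only [chunkA, chunkB]; simp [hc]
    · simp only [chunkA, chunkB]; simp [hc]; try decide

lemma cap_chunk_ne_zero (n : Int) (u : Bool) (i : Int) (h : i ≠ 0) :
    chunkA n false true u i = chunkB n u i := by
  cases u
  · simp only [chunkA, chunkB]; simp [h]; try decide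
  · by_cases hc : (i == n - 1 && decide (1 < n)) = true
    · simp only [chunkA, chunkB]; simp [hc]
    · simp only [chunkA, chunkB]; simp [hc, h]; try decide

lemma plain_case (n : Int) (l : List Int) : ∀ u,
    sufA n false false l u = (partsB n l u).flatten := by
  induction l with
  | nil => intro u; simp [sufA, partsB]
  | cons i l ih =>
    intro u
    simp only [sufA, partsB, List.flatten_cons, plain_chunk]
    rw [ih]

lemma cap_tail_case (n : Int) (l : List Int) (h : ∀ i ∈ l, i ≠ 0) : ∀ u,
    sufA n false true l u = (partsB n l u).flatten := by
  induction l with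
  | nil => intro u; simp [sufA, partsB]
  | cons i l ih =>
    intro u
    simp only [sufA, partsB, List.flatten_cons,
      cap_chunk_ne_zero n u i (h i (List.mem_cons_self ..))]
    rw [ih (fun j hj => h j (List.mem_cons_of_mem _ hj))]

lemma zero_not_last (n : Int) : (((0:Int) == n - 1) && decide (1 < n)) = false := by
  by_cases h1 : (1:Int) < n
  · have h0 : ¬ ((0:Int) = n - 1) := by omega
    simp [h0]
  · simp [h1]

lemma cap_case (n : Int) : ∀ u,
    sufA n false true (PySem.List.pyRange 0 n) u
      = PySem.Chars.upper (((partsB n (PySem.List.pyRange 0 n) u).flatten).take 1)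
        ++ ((partsB n (PySem.List.pyRange 0 n) u).flatten).drop 1 := by
  intro u
  by_cases hn : 0 < n
  · rw [PySem.List.pyRange_one_cons hn]
    have hne : ∀ i ∈ PySem.List.pyRange (0+1) n, i ≠ 0 := by
      intro i hi
      have := PySem.List.mem_pyRange_one.mp hi
      omega
    simp only [sufA, partsB, List.flatten_cons]
    rw [cap_tail_case n _ hne]
    have hz := zero_not_last n
    cases u <;>
      (simp [chunkA, chunkB, hz, PySem.Chars.upper, PySem.Chars.upperChar]; try decide)
  · have : PySem.List.pyRange 0 n = [] := by
      simp [PySem.List.pyRange]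
      omega
    rw [this]
    simp [sufA, partsB, PySem.Chars.upper]

-- ===== VERDICT (by name: the statement is the Claim_ definition above) =====
theorem generate_pika_spec : Claim_equal_generate_pika := by
  intro n sp cap caps _
  unfold Spec_generate_pika
  rw [gp_eq, gpalt_eq]
  cases caps
  · cases cap
    · simp [plain_case]
    · simp [cap_case]
  · simp [caps_case]
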